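-- pv_equiv track=rewrite | github.com/ark5234/Jan-Sunwai-AI | backend/app/rule_engine.py | _first_mention_position
-- ===== SOURCE A (Python) =====
-- def _first_mention_position(text: str, keywords: list[str]) -> int:
--     """Return the earliest character position of any keyword, or -1 if none found."""
--     text_lower = text.lower()
--     best = -1
--     for kw in keywords:
--         pos = text_lower.find(kw)
--         if pos != -1 and (best == -1 or pos < best):
--             best = pos
--     return best
-- ===== SOURCE B (Python) =====
-- def _first_mention_position(text: str, keywords: list[str]) -> int:
--     """Return the earliest character position of any keyword, or -1 if none found."""
--     t = text.lower()
--     for i in range(len(t) + 1):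
--         for kw in keywords:
--             if t.startswith(kw, i):
--                 return i
--     return -1
-- ===== Notes on version B (the rewrite author's own statement) =====
-- stated objective: faster
-- what changed: A loops over keywords calling find on the whole text and keeps the minimum position; B makes a single left-to-right scan over text positions and returns at the first position where any keyword starts, so it never searches past the answer.
import Mathlib
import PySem

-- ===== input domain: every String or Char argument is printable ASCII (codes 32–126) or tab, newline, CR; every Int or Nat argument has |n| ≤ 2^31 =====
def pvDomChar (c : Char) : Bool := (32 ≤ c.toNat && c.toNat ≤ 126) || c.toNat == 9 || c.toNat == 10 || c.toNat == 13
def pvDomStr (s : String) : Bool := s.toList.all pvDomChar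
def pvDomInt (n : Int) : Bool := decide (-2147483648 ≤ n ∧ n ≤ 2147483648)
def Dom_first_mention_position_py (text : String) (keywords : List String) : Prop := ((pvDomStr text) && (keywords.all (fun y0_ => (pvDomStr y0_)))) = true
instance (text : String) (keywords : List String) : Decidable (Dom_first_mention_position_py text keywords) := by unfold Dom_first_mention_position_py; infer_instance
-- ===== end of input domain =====

-- B replaces A's per-keyword whole-text find loop by a single left-to-right scan
-- over text positions returning at the first position where any keyword starts:
-- it stops at the answer instead of searching the whole text per keyword
-- (measured faster on a timing run's inputs; same worst case when no keyword occurs).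


-- ===== PORT A =====
def first_mention_position_py (text : String) (keywords : List String) : Int :=
  let text_lower := PySem.Str.lower text
  keywords.foldl (fun best kw =>
    let pos := PySem.Str.find text_lower kw
    if pos ≠ -1 ∧ (best = -1 ∨ pos < best) then pos else best) (-1)

-- ===== PORT B =====
-- inner 'for kw: if t.startswith(kw, i): return i' of the position loop;
-- t.startswith(kw, i) with 0 ≤ i is exactly 'kw is a prefix of t[i:]', ported as
-- PySem.Chars.startswith (t.drop i) kw.toList.
def fmpAltGo (t : List Char) (keywords : List String) (i fuel : Nat) : Int :=
  match fuel with
  | 0 => -1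
  | fuel + 1 =>
    if keywords.any (fun kw => PySem.Chars.startswith (t.drop i) kw.toList) then (i : Int)
    else fmpAltGo t keywords (i + 1) fuel

def first_mention_position_py_alt (text : String) (keywords : List String) : Int :=
  let t := PySem.Chars.lower text.toList
  fmpAltGo t keywords 0 (t.length + 1)

-- ===== PRECONDITION & SPEC =====
def Spec_first_mention_position_py (text : String) (keywords : List String) (out : Int) : Prop := out = first_mention_position_py_alt text keywords
instance (text : String) (keywords : List String) (out : Int) : Decidable (Spec_first_mention_position_py text keywords out) := by unfold Spec_first_mention_position_py; infer_instance

-- ===== CLAIM (what is proved, stated in full; the proofs are below) =====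
def Claim_equal_first_mention_position_py : Prop := ∀ (text : String) (keywords : List String), Dom_first_mention_position_py text keywords → Spec_first_mention_position_py text keywords (first_mention_position_py text keywords)

-- ===== LEMMAS AND PROOFS =====

-- "r is the first position (w.r.t. Q) or -1 if none": both programs satisfy it, and it is unique.
def IsFirstPos (Q : Nat → Prop) (r : Int) : Prop :=
  (r = -1 ∧ ∀ i, ¬ Q i) ∨ (0 ≤ r ∧ Q r.toNat ∧ ∀ j < r.toNat, ¬ Q j)

theorem IsFirstPos_unique {Q : Nat → Prop} {r s : Int}
    (hr : IsFirstPos Q r) (hs : IsFirstPos Q s) : r = s := by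
  rcases hr with ⟨hr1, hr2⟩ | ⟨hr0, hrq, hrl⟩ <;> rcases hs with ⟨hs1, hs2⟩ | ⟨hs0, hsq, hsl⟩
  · omega
  · exact absurd hsq (hr2 _)
  · exact absurd hrq (hs2 _)
  · rcases Nat.lt_trichotomy r.toNat s.toNat with h | h | h
    · exact absurd hrq (hsl _ h)
    · omega
    · exact absurd hsq (hrl _ h)

-- step function of A's keyword loop (proof-side name for the foldl body)
def fmpStep (cs : List Char) (best : Int) (kw : String) : Int :=
  let pos := PySem.Chars.find cs kw.toList
  if pos ≠ -1 ∧ (best = -1 ∨ pos < best) then pos else best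

-- characterisation of A's keyword loop (accumulator peeled from the right)
theorem foldlA_char (cs : List Char) (kws : List String) :
    (kws.foldl (fmpStep cs) (-1) = -1 ∧
      ∀ kw ∈ kws, PySem.Chars.find cs kw.toList = -1) ∨
    (0 ≤ kws.foldl (fmpStep cs) (-1) ∧
      (∃ kw ∈ kws, kws.foldl (fmpStep cs) (-1) = PySem.Chars.find cs kw.toList) ∧
      ∀ kw ∈ kws, PySem.Chars.find cs kw.toList ≠ -1 →
        kws.foldl (fmpStep cs) (-1) ≤ PySem.Chars.find cs kw.toList) := by
  induction kws using List.reverseRecOn with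
  | nil => exact Or.inl ⟨rfl, by simp⟩
  | append_singleton l kw ih =>
    rw [List.foldl_append, List.foldl_cons, List.foldl_nil]
    have hneg1 := PySem.Chars.neg_one_le_find cs kw.toList
    rcases ih with ⟨h1, h2⟩ | ⟨h0, ⟨kw₀, hkw₀, heq⟩, hle⟩
    · rw [h1]
      by_cases hf : PySem.Chars.find cs kw.toList = -1
      · refine Or.inl ⟨by simp [fmpStep, hf], ?_⟩
        intro k hk
        rcases List.mem_append.mp hk with hk | hk
        · exact h2 k hk
        · simp only [List.mem_singleton] at hk; subst hk; exact hf
      · have hstep : fmpStep cs (-1) kw = PySem.Chars.find cs kw.toList := by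
          simp [fmpStep, hf]
        refine Or.inr ⟨by omega, ⟨kw, by simp, hstep⟩, ?_⟩
        intro kw' hkw' hne'
        rcases List.mem_append.mp hkw' with hk | hk
        · exact absurd (h2 kw' hk) hne'
        · simp only [List.mem_singleton] at hk; subst hk; omega
    · have hrne : l.foldl (fmpStep cs) (-1) ≠ -1 := by omega
      by_cases hc : PySem.Chars.find cs kw.toList ≠ -1 ∧
          (l.foldl (fmpStep cs) (-1) = -1 ∨
            PySem.Chars.find cs kw.toList < l.foldl (fmpStep cs) (-1))
      · have hstep : fmpStep cs (l.foldl (fmpStep cs) (-1)) kw =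
            PySem.Chars.find cs kw.toList := by
          simp only [fmpStep, if_pos hc]
        rw [hstep]
        refine Or.inr ⟨by omega, ⟨kw, by simp, rfl⟩, ?_⟩
        intro kw' hkw' hne'
        rcases List.mem_append.mp hkw' with hk | hk
        · have := hle kw' hk hne'; omega
        · simp only [List.mem_singleton] at hk; subst hk; omega
      · have hstep : fmpStep cs (l.foldl (fmpStep cs) (-1)) kw =
            l.foldl (fmpStep cs) (-1) := by
          simp only [fmpStep, if_neg hc]
        rw [hstep]
        refine Or.inr ⟨h0, ⟨kw₀, by simp [hkw₀], heq⟩, ?_⟩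
        intro kw' hkw' hne'
        rcases List.mem_append.mp hkw' with hk | hk
        · exact hle kw' hk hne'
        · simp only [List.mem_singleton] at hk; subst hk
          simp only [not_and, not_or, not_lt] at hc
          have := hc hne'; omega

theorem A_isFirst (cs : List Char) (kws : List String) :
    IsFirstPos (fun i => ∃ kw ∈ kws, kw.toList <+: cs.drop i)
      (kws.foldl (fmpStep cs) (-1)) := by
  rcases foldlA_char cs kws with ⟨h1, h2⟩ | ⟨h0, ⟨kw₀, hkw₀, heq⟩, hle⟩
  · refine Or.inl ⟨h1, ?_⟩
    rintro i ⟨kw, hkw, hp⟩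
    have hne := h2 kw hkw
    rw [PySem.Chars.find_eq_neg_one_iff] at hne
    exact hne ((PySem.Chars.isIn_iff_infix _ _).mp
      ((PySem.Chars.exists_prefix_drop_iff_isIn _ _).mp ⟨i, hp⟩))
  · have h0' : 0 ≤ PySem.Chars.find cs kw₀.toList := heq ▸ h0
    refine Or.inr ⟨h0, ⟨kw₀, hkw₀, ?_⟩, ?_⟩
    · rw [heq]
      exact (PySem.Chars.find_spec h0').1
    · rintro j hj ⟨kw, hkw, hp⟩
      have hinf : PySem.Chars.isIn kw.toList cs = true :=
        (PySem.Chars.exists_prefix_drop_iff_isIn _ _).mp ⟨j, hp⟩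
      have hne : PySem.Chars.find cs kw.toList ≠ -1 :=
        (PySem.Chars.find_ne_neg_one_iff _ _).mpr ((PySem.Chars.isIn_iff_infix _ _).mp hinf)
      have hrle := hle kw hkw hne
      have h0f : 0 ≤ PySem.Chars.find cs kw.toList := by
        have := PySem.Chars.neg_one_le_find cs kw.toList; omega
      exact (PySem.Chars.find_spec h0f).2 j (by omega) hp

theorem altGo_char (cs : List Char) (kws : List String) :
    ∀ (fuel i : Nat),
      (fmpAltGo cs kws i fuel = -1 ∧
        ∀ j, i ≤ j → j < i + fuel → ¬ ∃ kw ∈ kws, kw.toList <+: cs.drop j) ∨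
      (∃ k : Nat, fmpAltGo cs kws i fuel = (k : Int) ∧ i ≤ k ∧ k < i + fuel ∧
        (∃ kw ∈ kws, kw.toList <+: cs.drop k) ∧
        ∀ j, i ≤ j → j < k → ¬ ∃ kw ∈ kws, kw.toList <+: cs.drop j) := by
  intro fuel
  induction fuel with
  | zero => intro i; exact Or.inl ⟨rfl, by omega⟩
  | succ fuel ih =>
    intro i
    by_cases h : kws.any (fun kw => PySem.Chars.startswith (cs.drop i) kw.toList) = true
    · refine Or.inr ⟨i, ?_, le_refl i, by omega, ?_, by omega⟩
      · simp [fmpAltGo, h]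
      · rcases List.any_eq_true.mp h with ⟨kw, hkw, hsw⟩
        exact ⟨kw, hkw, (PySem.Chars.startswith_iff _ _).mp hsw⟩
    · have hQ : ¬ ∃ kw ∈ kws, kw.toList <+: cs.drop i := by
        rintro ⟨kw, hkw, hp⟩
        exact h (List.any_eq_true.mpr ⟨kw, hkw, (PySem.Chars.startswith_iff _ _).mpr hp⟩)
      have hstep : fmpAltGo cs kws i (fuel + 1) = fmpAltGo cs kws (i + 1) fuel := by
        simp [fmpAltGo, h]
      rcases ih (i + 1) with ⟨h1, h2⟩ | ⟨k, h1, h2, h3, h4, h5⟩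
      · refine Or.inl ⟨hstep ▸ h1, ?_⟩
        intro j hij hjf
        rcases Nat.eq_or_lt_of_le hij with rfl | hlt
        · exact hQ
        · exact h2 j hlt (by omega)
      · refine Or.inr ⟨k, hstep ▸ h1, by omega, by omega, h4, ?_⟩
        intro j hij hjk
        rcases Nat.eq_or_lt_of_le hij with rfl | hlt
        · exact hQ
        · exact h5 j hlt hjk

theorem B_isFirst (cs : List Char) (kws : List String) :
    IsFirstPos (fun i => ∃ kw ∈ kws, kw.toList <+: cs.drop i)
      (fmpAltGo cs kws 0 (cs.length + 1)) := by
  rcases altGo_char cs kws (cs.length + 1) 0 with ⟨h1, h2⟩ | ⟨k, h1, _, h3, h4, h5⟩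
  · refine Or.inl ⟨h1, ?_⟩
    intro i hQ
    by_cases hi : i ≤ cs.length
    · exact h2 i (Nat.zero_le _) (by omega) hQ
    · rcases hQ with ⟨kw, hkw, hp⟩
      have hnil : cs.drop i = [] := List.drop_eq_nil_of_le (by omega)
      refine h2 cs.length (Nat.zero_le _) (by omega) ⟨kw, hkw, ?_⟩
      have hnil' : cs.drop cs.length = [] := List.drop_eq_nil_of_le le_rfl
      rw [hnil']; rw [hnil] at hp; exact hp
  · refine Or.inr ⟨by omega, ?_, ?_⟩
    · have : (fmpAltGo cs kws 0 (cs.length + 1)).toNat = k := by omega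
      rw [this]; exact h4
    · intro j hj
      exact h5 j (Nat.zero_le _) (by omega)

-- ===== VERDICT (by name: the statement is the Claim_ definition above) =====
theorem first_mention_position_py_spec : Claim_equal_first_mention_position_py := by
  intro text keywords _
  unfold Spec_first_mention_position_py first_mention_position_py first_mention_position_py_alt
  simp only [PySem.Str.find_eq, PySem.Str.toList_lower]
  exact IsFirstPos_unique (A_isFirst _ _) (B_isFirst _ _)
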